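-- pv_equiv track=rewrite | github.com/skywalkerqwer/PythonBase | week02/day09--函数参数/exericise/合并相同元素.py | add_left
-- ===== SOURCE A (Python) =====
-- def move_left(list_target):
--     new_list = [item for item in list_target if item != 0]
--     new_list += [0] * list_target.count(0)
--     return new_list
--
-- def add_left(list_target):
--     list_1 = move_left(list_target)
--     for i in range(len(list_1) - 1):
--         if  list_1[i] != 0 and list_1[i] == list_1[i + 1]:
--             list_1[i] += list_1[i+1]
--             list_1[i+1] = 0
--     list_1 = move_left(list_1)
--     return list_1
-- ===== SOURCE B (Python) =====
-- # Single forward pass over the nonzero elements with a pair-skip,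
-- # then pad with zeros to the original length (simpler: one scan
-- # instead of compact / merge-in-place / compact).
-- def add_left(list_target):
--     nz = [x for x in list_target if x != 0]
--     res = []
--     i = 0
--     n = len(nz)
--     while i < n:
--         if i + 1 < n and nz[i] == nz[i + 1]:
--             res.append(nz[i] + nz[i + 1])
--             i += 2
--         else:
--             res.append(nz[i])
--             i += 1
--     return res + [0] * (len(list_target) - len(res))
-- ===== Notes on version B (the rewrite author's own statement) =====
-- stated objective: simpler
-- what changed: Replaces A's three passes (compact, index-based merge-in-place that writes zeros, compact again) by one forward scan of the nonzero elements that consumes a merged pair at once, plus zero padding to the original length.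
import Mathlib
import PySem

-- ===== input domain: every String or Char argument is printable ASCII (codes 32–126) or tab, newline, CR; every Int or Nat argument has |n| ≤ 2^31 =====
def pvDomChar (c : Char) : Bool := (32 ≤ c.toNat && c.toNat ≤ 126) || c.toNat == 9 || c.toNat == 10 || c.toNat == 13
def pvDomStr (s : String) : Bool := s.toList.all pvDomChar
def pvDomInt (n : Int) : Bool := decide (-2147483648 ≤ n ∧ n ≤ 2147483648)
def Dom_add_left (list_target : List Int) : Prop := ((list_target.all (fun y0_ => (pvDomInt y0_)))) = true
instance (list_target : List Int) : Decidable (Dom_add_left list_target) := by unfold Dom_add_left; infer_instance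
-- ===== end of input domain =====

-- B replaces A's three passes (compact, index merge-in-place, compact) by one
-- forward scan of the nonzero elements plus zero padding; objective: simpler.

-- ===== PORT A =====
-- move_left: nonzero elements first, then as many zeros as the input contains
def move_left (list_target : List Int) : List Int :=
  (list_target.filter (fun item => item != 0)) ++
    List.replicate (PySem.List.count list_target 0) 0

-- one iteration of A's for-loop body; indices i and i+1 are always in range
-- when the loop invokes it (i ∈ range (len-1)), so getD is exact here
def addLeftStep (l : List Int) (i : Nat) : List Int :=
  if l.getD i 0 ≠ 0 ∧ l.getD i 0 = l.getD (i + 1) 0 then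
    (l.set i (l.getD i 0 + l.getD (i + 1) 0)).set (i + 1) 0
  else l

def add_left (list_target : List Int) : List Int :=
  let list_1 := move_left list_target
  let list_1 := (List.range (list_1.length - 1)).foldl addLeftStep list_1
  move_left list_1

-- ===== PORT B =====
-- B's while loop over index i: the remaining suffix nz[i:] is the argument;
-- appending to res is cons, i += 2 / i += 1 is dropping two / one elements
def mergeScan : List Int → List Int
  | [] => []
  | [a] => [a]
  | a :: b :: t => if a = b then (a + b) :: mergeScan t else a :: mergeScan (b :: t)

def add_left_alt (list_target : List Int) : List Int :=
  let nz := list_target.filter (fun x => x != 0)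
  let res := mergeScan nz
  res ++ List.replicate (list_target.length - res.length) 0

-- ===== PRECONDITION & SPEC =====
def Spec_add_left (list_target : List Int) (out : List Int) : Prop := out = add_left_alt list_target
instance (list_target : List Int) (out : List Int) : Decidable (Spec_add_left list_target out) := by unfold Spec_add_left; infer_instance

-- ===== CLAIM (what is proved, stated in full; the proofs are below) =====
def Claim_equal_add_left : Prop := ∀ (list_target : List Int), Dom_add_left list_target → Spec_add_left list_target (add_left list_target)

-- ===== LEMMAS AND PROOFS =====

-- recursive characterisation of A's index loop
def loopRec : List Int → List Int
  | [] => []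
  | [a] => [a]
  | a :: b :: t => if a ≠ 0 ∧ a = b then (a + b) :: loopRec (0 :: t) else a :: loopRec (b :: t)
termination_by l => l.length
decreasing_by all_goals simp

theorem loopRec_cons_cons (a b : Int) (t : List Int) :
    loopRec (a :: b :: t) = if a ≠ 0 ∧ a = b then (a + b) :: loopRec (0 :: t) else a :: loopRec (b :: t) := by
  simp [loopRec]

theorem addLeftStep_cons_succ (c : Int) (l : List Int) (i : Nat) :
    addLeftStep (c :: l) (i + 1) = c :: addLeftStep l i := by
  simp [addLeftStep]; split_ifs <;> simp_all

theorem foldl_addLeftStep_map_succ (r : List Nat) (c : Int) (l : List Int) :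
    (r.map (· + 1)).foldl addLeftStep (c :: l) = c :: r.foldl addLeftStep l := by
  induction r generalizing l with
  | nil => rfl
  | cons i r ih => simp [List.foldl_cons, addLeftStep_cons_succ, ih]

theorem addLeftStep_zero (a b : Int) (t : List Int) :
    addLeftStep (a :: b :: t) 0 =
      if a ≠ 0 ∧ a = b then (a + b) :: 0 :: t else a :: b :: t := by
  simp [addLeftStep]

theorem loop_eq_loopRec (l : List Int) :
    (List.range (l.length - 1)).foldl addLeftStep l = loopRec l := by
  fun_induction loopRec l with
  | case1 => rfl
  | case2 a => rfl
  | case3 a b t h ih =>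
      have hr : List.range (t.length + 1) = 0 :: (List.range t.length).map (· + 1) := by
        simp [List.range_succ_eq_map]
      simp only [List.length_cons, Nat.add_sub_cancel, hr, List.foldl_cons,
        addLeftStep_zero, if_pos h]
      rw [foldl_addLeftStep_map_succ, show List.range t.length = List.range ((0 :: t).length - 1) by simp,
        ih]
  | case4 a b t h ih =>
      have hr : List.range (t.length + 1) = 0 :: (List.range t.length).map (· + 1) := by
        simp [List.range_succ_eq_map]
      simp only [List.length_cons, Nat.add_sub_cancel, hr, List.foldl_cons,
        addLeftStep_zero, if_neg h]
      rw [foldl_addLeftStep_map_succ, show List.range t.length = List.range ((b :: t).length - 1) by simp,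
        ih]

theorem loopRec_zero_cons (t : List Int) : loopRec (0 :: t) = 0 :: loopRec t := by
  cases t with
  | nil => simp [loopRec]
  | cons b t => simp [loopRec]

theorem loopRec_replicate (k : Nat) :
    loopRec (List.replicate k 0) = List.replicate k (0 : Int) := by
  induction k with
  | zero => simp [loopRec]
  | succ k ih => simp [List.replicate_succ, loopRec_zero_cons, ih]

theorem length_loopRec (l : List Int) : (loopRec l).length = l.length := by
  fun_induction loopRec l with
  | case1 => rfl
  | case2 a => rfl
  | case3 a b t h ih => simp_all [loopRec_zero_cons]
  | case4 a b t h ih => simp_all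

theorem filter_loopRec (nz : List Int) (k : Nat) (h : (0 : Int) ∉ nz) :
    (loopRec (nz ++ List.replicate k 0)).filter (fun x => x != 0) = mergeScan nz := by
  fun_induction mergeScan nz with
  | case1 => simp [loopRec_replicate]
  | case2 a =>
      have ha : a ≠ 0 := by intro e; exact h (by simp [e])
      cases k with
      | zero => simp [loopRec, ha]
      | succ k =>
          simp only [List.cons_append, List.nil_append, List.replicate_succ]
          rw [loopRec_cons_cons, if_neg (by intro hc; exact ha hc.2), loopRec_zero_cons,
            loopRec_replicate]
          simp [ha]
  | case3 b t ih =>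
      have hb : b ≠ 0 := by intro e; exact h (by simp [e])
      have h2b : b + b ≠ 0 := by omega
      have ht : (0 : Int) ∉ t := fun m => h (by simp [m])
      simp only [List.cons_append]
      rw [loopRec_cons_cons, if_pos ⟨hb, rfl⟩, loopRec_zero_cons]
      simp [h2b, ih ht]
  | case4 a b t hab ih =>
      have ha : a ≠ 0 := by intro e; exact h (by simp [e])
      have ht : (0 : Int) ∉ (b :: t) := fun m => h (by simp at m ⊢; tauto)
      simp only [List.cons_append]
      rw [loopRec_cons_cons, if_neg (by intro hc; exact hab hc.2)]
      simp only [List.cons_append] at ih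
      simp [ha, ih ht]

theorem filter_length_add_count (l : List Int) :
    (l.filter (fun x => x != 0)).length + l.count 0 = l.length := by
  induction l with
  | nil => rfl
  | cons x l ih =>
      by_cases hx : x = 0
      · simp [hx] at *; omega
      · simp [hx] at *; omega

-- ===== VERDICT (by name: the statement is the Claim_ definition above) =====
theorem add_left_spec : Claim_equal_add_left := by
  intro lt _
  unfold Spec_add_left add_left add_left_alt move_left
  dsimp only
  set nz := lt.filter (fun x => x != 0) with hnz
  have hmem : (0 : Int) ∉ nz := by
    intro hm
    have := List.of_mem_filter hm
    simp at this
  rw [PySem.List.count_eq, loop_eq_loopRec]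
  set L := loopRec (nz ++ List.replicate (lt.count 0) 0) with hL
  have hLf : L.filter (fun x => x != 0) = mergeScan nz := filter_loopRec nz _ hmem
  have hLlen : L.length = lt.length := by
    rw [hL, length_loopRec, List.length_append, List.length_replicate]
    have := filter_length_add_count lt
    omega
  rw [PySem.List.count_eq, hLf]
  have h1 := filter_length_add_count L
  rw [hLf] at h1
  rw [show List.count 0 L = lt.length - (mergeScan nz).length by omega]
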